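-- pv_equiv track=rewrite | github.com/DyogenIBENS/Agora | src/utils/myGenomes.py | getMonoNuc
-- ===== SOURCE A (Python) =====
-- def getMonoNuc(seq, x1, x2, sel):
--     n = 0
--     gc = 0
--     for x in range(x1, x2+1):
--         if seq[x] == "N":
--             continue
--         n += 1
--         if seq[x] in sel:
--             gc += 1
--     return (n,gc)
-- ===== SOURCE B (Python) =====
-- def getMonoNuc(seq, x1, x2, sel):
--     # Histogram pass: count every indexed character once, then aggregate.
--     counts = {}
--     for x in range(x1, x2 + 1):
--         c = seq[x]
--         counts[c] = counts.get(c, 0) + 1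
--     n = sum(counts.values()) - counts.get("N", 0)
--     sel_count = sum(counts.get(c, 0) for c in set(sel) if c != "N")
--     return (n, sel_count)
-- ===== Notes on version B (the rewrite author's own statement) =====
-- stated objective: alternative
-- what changed: B builds a character frequency table in one pass and derives n and gc by aggregating the histogram afterwards (subtracting the 'N' count, summing counts over the deduplicated selection), instead of A's per-character branching with two running accumulators and a list-membership test inside the loop.
import Mathlib
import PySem

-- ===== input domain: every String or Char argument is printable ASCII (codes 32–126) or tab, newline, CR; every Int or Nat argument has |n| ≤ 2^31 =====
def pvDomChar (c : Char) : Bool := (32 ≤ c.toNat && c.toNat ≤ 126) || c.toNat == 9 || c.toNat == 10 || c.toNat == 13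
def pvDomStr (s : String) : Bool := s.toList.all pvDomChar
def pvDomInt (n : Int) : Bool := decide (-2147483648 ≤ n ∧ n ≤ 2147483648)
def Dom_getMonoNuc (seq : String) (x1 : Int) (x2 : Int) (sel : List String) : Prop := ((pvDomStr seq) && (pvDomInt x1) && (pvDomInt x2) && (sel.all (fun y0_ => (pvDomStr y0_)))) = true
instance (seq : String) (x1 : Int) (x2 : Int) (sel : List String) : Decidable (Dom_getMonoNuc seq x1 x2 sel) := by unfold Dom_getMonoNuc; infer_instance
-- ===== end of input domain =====

-- B replaces A's two running accumulators (with an inner list-membership test) by a one-pass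
-- character histogram aggregated afterwards; objective: alternative decomposition, same results.


-- ===== PORT A =====
-- literal port of A: one pass over range(x1, x2+1), skip 'N', count n and (membership in sel) gc.
-- seq[x] is PySem.Str.pyGet?; the 'none' (IndexError) case never occurs under Pre_ and leaves the state unchanged.
def getMonoNuc (seq : String) (x1 : Int) (x2 : Int) (sel : List String) : Int × Int :=
  (PySem.List.pyRange x1 (x2 + 1) 1).foldl
    (fun (p : Int × Int) x =>
      match PySem.Str.pyGet? seq x with
      | none => p
      | some c =>
        if String.singleton c == "N" then p
        else (p.1 + 1, if sel.contains (String.singleton c) then p.2 + 1 else p.2))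
    (0, 0)

-- ===== PORT B =====
-- literal port of Source B: build the histogram dict, then n = sum(values) - counts.get('N',0),
-- gc = sum of counts over set(sel) minus 'N'.
def getMonoNuc_alt (seq : String) (x1 : Int) (x2 : Int) (sel : List String) : Int × Int :=
  let counts : PySem.Dict String Int :=
    (PySem.List.pyRange x1 (x2 + 1) 1).foldl
      (fun d x =>
        match PySem.Str.pyGet? seq x with
        | none => d
        | some c => d.insert (String.singleton c) (d.getD (String.singleton c) 0 + 1))
      PySem.Dict.empty
  let n : Int := counts.values.sum - counts.getD "N" 0
  let gc : Int :=
    (PySem.Set.ofList sel).foldl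
      (fun acc c => if c == "N" then acc else acc + counts.getD c 0) 0
  (n, gc)

-- ===== PRECONDITION & SPEC =====
-- Pre_ excludes exactly the inputs where Python A raises IndexError: a nonempty index range
-- containing an index outside [-len(seq), len(seq)).
def Pre_getMonoNuc (seq : String) (x1 : Int) (x2 : Int) (sel : List String) : Prop :=
  x2 < x1 ∨ (PySem.Raise.InRange seq.toList.length x1 ∧ PySem.Raise.InRange seq.toList.length x2)
instance (seq : String) (x1 : Int) (x2 : Int) (sel : List String) : Decidable (Pre_getMonoNuc seq x1 x2 sel) := by unfold Pre_getMonoNuc; infer_instance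

def pvWitness_getMonoNuc : String × Int × Int × List String := ("ACGTN", 0, 4, ["G", "C"])

def Spec_getMonoNuc (seq : String) (x1 : Int) (x2 : Int) (sel : List String) (out : Int × Int) : Prop := out = getMonoNuc_alt seq x1 x2 sel
instance (seq : String) (x1 : Int) (x2 : Int) (sel : List String) (out : Int × Int) : Decidable (Spec_getMonoNuc seq x1 x2 sel out) := by unfold Spec_getMonoNuc; infer_instance

-- ===== CLAIM (what is proved, stated in full; the proofs are below) =====
def Claim_equal_getMonoNuc : Prop := ∀ (seq : String) (x1 : Int) (x2 : Int) (sel : List String), Dom_getMonoNuc seq x1 x2 sel → Pre_getMonoNuc seq x1 x2 sel → Spec_getMonoNuc seq x1 x2 sel (getMonoNuc seq x1 x2 sel)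

-- ===== LEMMAS AND PROOFS =====

-- a fold that skips 'none' entries is a fold over the filterMap
theorem foldl_match_filterMap {α β γ : Type} (L : List α) (g : α → Option γ)
    (f : β → γ → β) (init : β) :
    L.foldl (fun b x => match g x with | none => b | some c => f b c) init
      = (L.filterMap g).foldl f init := by
  induction L generalizing init with
  | nil => rfl
  | cons a L ih =>
      simp only [List.foldl_cons, List.filterMap_cons]
      cases g a <;> simp [ih]

-- pointwise-equal step functions give equal folds
theorem foldl_congr_fun {α β : Type} (L : List α) (f g : β → α → β) (init : β)
    (h : ∀ b x, f b x = g b x) : L.foldl f init = L.foldl g init := by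
  induction L generalizing init with
  | nil => rfl
  | cons a L ih => simp only [List.foldl_cons, h, ih]

-- A's fold counts non-'N' chars and non-'N' chars in sel
theorem a_fold_eq (sel : List String) (cs : List String) (p : Int × Int) :
    cs.foldl
      (fun (p : Int × Int) c =>
        if c == "N" then p
        else (p.1 + 1, if sel.contains c then p.2 + 1 else p.2)) p
      = (p.1 + (cs.countP (fun c => !(c == "N")) : Int),
         p.2 + (cs.countP (fun c => !(c == "N") && sel.contains c) : Int)) := by
  induction cs generalizing p with
  | nil => simp
  | cons c cs ih =>
      rw [List.foldl_cons, List.countP_cons, List.countP_cons]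
      by_cases hN : (c == "N") = true
      · rw [if_pos hN, ih]
        simp [hN]
      · rw [if_neg hN, ih]
        have hN' : (!(c == "N")) = true := by simp [hN]
        by_cases hs : c ∈ sel <;>
          simp [hN', hs, List.contains_eq_mem, Prod.ext_iff] <;> omega

-- counting membership in (k :: S) splits off count of k when k ∉ S
theorem countP_mem_cons (k : String) (S : List String) (hk : k ∉ S) (cs : List String) :
    cs.countP (fun c => decide (c ∈ (k :: S)))
      = cs.count k + cs.countP (fun c => decide (c ∈ S)) := by
  induction cs with
  | nil => simp
  | cons c cs ihc =>
      rw [List.countP_cons, List.countP_cons, List.count_cons, ihc]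
      by_cases hck : c = k
      · subst hck
        have hcS : c ∉ S := hk
        simp [hcS] <;> omega
      · by_cases hcS : c ∈ S <;> simp [hck, hcS] <;> omega

-- summing counts over a nodup list of keys counts membership
theorem sum_counts (S : List String) (hS : S.Nodup) (cs : List String) :
    (S.map (fun k => (cs.count k : Int))).sum
      = (cs.countP (fun c => decide (c ∈ S)) : Int) := by
  induction S with
  | nil => simp
  | cons k S ih =>
      have hk : k ∉ S := (List.nodup_cons.mp hS).1
      rw [List.map_cons, List.sum_cons, ih (List.nodup_cons.mp hS).2,
          countP_mem_cons k S hk cs]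
      push_cast; ring

-- countP over the whole dedup is the length
theorem countP_ofList_self (cs : List String) :
    cs.countP (fun c => decide (c ∈ PySem.Set.ofList cs)) = cs.length := by
  rw [List.countP_eq_length]
  intro c hc
  simp [PySem.Set.mem_ofList, hc]

-- the gc fold over set(sel) is the sum over the non-'N' elements
theorem gc_fold_eq (g : String → Int) (S : List String) (a : Int) :
    S.foldl (fun acc c => if c == "N" then acc else acc + g c) a
      = a + ((S.filter (fun c => !(c == "N"))).map g).sum := by
  induction S generalizing a with
  | nil => simp
  | cons c S ih =>
      rw [List.foldl_cons, List.filter_cons]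
      by_cases h : (c == "N") = true
      · rw [if_pos h]
        simp only [h, Bool.not_true, Bool.false_eq_true, if_false, ih]
      · rw [if_neg h]
        have h' : (!(c == "N")) = true := by simp [h]
        rw [if_pos h', List.map_cons, List.sum_cons, ih]
        ring

-- ===== VERDICT (by name: the statement is the Claim_ definition above) =====
theorem getMonoNuc_spec : Claim_equal_getMonoNuc := by
  intro seq x1 x2 sel _ _
  unfold Spec_getMonoNuc getMonoNuc getMonoNuc_alt
  dsimp only
  set L := PySem.List.pyRange x1 (x2 + 1) 1 with hL
  set g : Int → Option String := fun x => (PySem.Str.pyGet? seq x).map String.singleton with hg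
  set cs : List String := L.filterMap g with hcs
  -- rewrite A's fold
  have hA : L.foldl
      (fun (p : Int × Int) x =>
        match PySem.Str.pyGet? seq x with
        | none => p
        | some c =>
          if String.singleton c == "N" then p
          else (p.1 + 1, if sel.contains (String.singleton c) then p.2 + 1 else p.2))
      (0, 0)
      = cs.foldl
        (fun (p : Int × Int) c =>
          if c == "N" then p
          else (p.1 + 1, if sel.contains c then p.2 + 1 else p.2)) (0, 0) := by
    rw [hcs, ← foldl_match_filterMap]
    apply foldl_congr_fun
    intro b x
    cases hx : PySem.List.pyGet? seq.toList x <;> simp [hg, PySem.Str.pyGet?, hx]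
  -- rewrite B's dict fold into a counter over cs
  have hB : L.foldl
      (fun (d : PySem.Dict String Int) x =>
        match PySem.Str.pyGet? seq x with
        | none => d
        | some c => d.insert (String.singleton c) (d.getD (String.singleton c) 0 + 1))
      PySem.Dict.empty
      = PySem.Dict.counter cs := by
    rw [hcs, ← PySem.Dict.foldl_insert_getD_add_one_eq_counter,
        ← foldl_match_filterMap]
    apply foldl_congr_fun
    intro d x
    cases hx : PySem.List.pyGet? seq.toList x <;> simp [hg, PySem.Str.pyGet?, hx]
  rw [hA, hB, a_fold_eq]
  -- n component
  have hvals : (PySem.Dict.counter cs).values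
      = (PySem.Set.ofList cs).map (fun k => (cs.count k : Int)) := by
    have := PySem.Dict.items_counter (xs := cs)
    simp only [PySem.Dict.values, this, List.map_map]
    rfl
  have hn : (PySem.Dict.counter cs).values.sum - (PySem.Dict.counter cs).getD "N" 0
      = (cs.countP (fun c => !(c == "N")) : Int) := by
    rw [hvals, sum_counts _ (PySem.Set.nodup_ofList cs) cs,
        countP_ofList_self, PySem.Dict.getD_counter]
    have hco : cs.countP (fun a => !(a == "N"))
        = cs.countP (fun a => decide ¬((a == "N") = true)) := by
      apply List.countP_congr; intro c _; cases h : (c == "N") <;> simp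
    have hlen := List.length_eq_countP_add_countP (l := cs) (p := fun c => c == "N")
    rw [List.count_eq_countP]
    omega
  -- gc component
  have hgc : (PySem.Set.ofList sel).foldl
      (fun acc c => if c == "N" then acc else acc + (PySem.Dict.counter cs).getD c 0) 0
      = (cs.countP (fun c => !(c == "N") && sel.contains c) : Int) := by
    rw [gc_fold_eq]
    have hfil : ((PySem.Set.ofList sel).filter (fun c => !(c == "N"))).Nodup :=
      List.Nodup.filter _ (PySem.Set.nodup_ofList sel)
    have hmap : ((PySem.Set.ofList sel).filter (fun c => !(c == "N"))).map
          (fun c => (PySem.Dict.counter cs).getD c 0)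
        = ((PySem.Set.ofList sel).filter (fun c => !(c == "N"))).map
          (fun k => (cs.count k : Int)) := by
      apply List.map_congr_left
      intro k _
      exact PySem.Dict.getD_counter cs k
    rw [hmap, sum_counts _ hfil cs]
    have : cs.countP
        (fun c => decide (c ∈ (PySem.Set.ofList sel).filter (fun c => !(c == "N"))))
        = cs.countP (fun c => !(c == "N") && sel.contains c) := by
      apply List.countP_congr
      intro c _
      simp [List.mem_filter, PySem.Set.mem_ofList, List.contains_eq_mem, And.comm]
    rw [this]
    omega
  rw [hn, hgc]
  simp
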